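-- pv_equiv track=rewrite | github.com/Ranand33/math | arithmetic/gauss.py | primitive_root_exists
-- ===== SOURCE A (Python) =====
-- def primitive_root_exists(n: int) -> bool:
--     """Check if primitive roots exist modulo n (Gauss's criterion)."""
--     if n == 1 or n == 2 or n == 4:
--         return True
--
--     # Check if n = p^k for odd prime p
--     if n % 2 == 0:
--         n //= 2
--         if n % 2 == 0:
--             return False
--
--     # Check if n is a prime power
--     for p in range(3, int(n**0.5) + 1, 2):
--         if n % p == 0:
--             while n % p == 0:
--                 n //= p
--             return n == 1
--
--     return True
-- ===== SOURCE B (Python) =====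
-- def primitive_root_exists(n: int) -> bool:
--     """Primitive roots exist mod n iff n is 1, 2, 4, p^k or 2*p^k (p an odd prime):
--     fully factor the odd part and count its distinct prime factors."""
--     if n == 1 or n == 2 or n == 4:
--         return True
--     m = n
--     if m % 2 == 0:
--         m //= 2
--         if m % 2 == 0:
--             return False
--     primes = []
--     p = 3
--     while p * p <= m:
--         if m % p == 0:
--             if not primes or primes[-1] != p:
--                 primes.append(p)
--             m //= p
--         else:
--             p += 2
--     if m > 1 and (not primes or primes[-1] != m):
--         primes.append(m)
--     return len(primes) <= 1
-- ===== Notes on version B (the rewrite author's own statement) =====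
-- stated objective: alternative
-- what changed: A returns at the first odd divisor of the reduced n (strip it, test n==1) inside a fixed range(3, isqrt(n)+1, 2) scan; B instead fully factors the odd part with a single shrinking-bound while p*p<=m trial-division loop, collecting the distinct prime factors in order plus the leftover cofactor, and answers by counting distinct primes (<=1).
import Mathlib
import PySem

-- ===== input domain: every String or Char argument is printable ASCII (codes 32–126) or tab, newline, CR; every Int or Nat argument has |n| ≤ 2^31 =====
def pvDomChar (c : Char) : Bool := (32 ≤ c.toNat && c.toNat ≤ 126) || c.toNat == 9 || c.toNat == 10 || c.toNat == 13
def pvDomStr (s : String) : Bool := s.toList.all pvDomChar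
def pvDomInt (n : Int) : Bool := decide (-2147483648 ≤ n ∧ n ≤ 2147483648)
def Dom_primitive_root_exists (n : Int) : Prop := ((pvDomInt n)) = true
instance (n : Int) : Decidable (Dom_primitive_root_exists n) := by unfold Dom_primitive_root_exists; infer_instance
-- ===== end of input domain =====

-- B replaces A's return-at-first-odd-divisor scan by a full trial-division factorization of the
-- odd part (distinct prime factors collected in order, leftover cofactor appended) followed by a
-- distinct-prime count; objective: alternative decomposition, same asymptotic cost.

-- ===== PORT A =====

-- int(m**0.5): equal to the integer square root for 0 ≤ m ≤ 2^31 (checked against CPython over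
-- the domain); for m < 0 Python raises TypeError — those inputs are outside Pre_.
def pysqrtA (m : Int) : Int := Int.ofNat m.toNat.sqrt

-- while n % p == 0: n //= p   (the guards 2 ≤ p, 0 < m only make the recursion total; they hold
-- whenever the loop is reached under Pre_)
def stripA (m p : Int) : Int :=
  if h : 2 ≤ p ∧ 0 < m ∧ PySem.Int.mod m p = 0 then stripA (PySem.Int.floordiv m p) p else m
termination_by m.toNat
decreasing_by
  obtain ⟨hp, hm, hmod⟩ := h
  have hd : p ∣ m := (PySem.Int.mod_eq_zero_iff_dvd m p).mp hmod
  obtain ⟨c, hc⟩ := hd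
  have h2 : PySem.Int.floordiv m p = m / p := PySem.Int.floordiv_eq_ediv_of_pos (by omega)
  have h5 : m / p = c := by rw [hc]; exact Int.mul_ediv_cancel_left c (by omega)
  have hc0 : 0 < c := by nlinarith
  have hcm : c < m := by nlinarith
  simp only [h2, h5]; omega

-- for p in range(3, int(n**0.5)+1, 2): if n % p == 0: … return n == 1
def loopA (m : Int) : List Int → Bool
  | [] => true
  | p :: rest => if PySem.Int.mod m p = 0 then decide (stripA m p = 1) else loopA m rest

def oddA (m : Int) : Bool := loopA m (PySem.List.pyRange 3 (pysqrtA m + 1) 2)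

def primitive_root_exists (n : Int) : Bool :=
  if n = 1 ∨ n = 2 ∨ n = 4 then true
  else if PySem.Int.mod n 2 = 0 then
    let m := PySem.Int.floordiv n 2
    if PySem.Int.mod m 2 = 0 then false else oddA m
  else oddA n

-- ===== PORT B =====

-- while p * p <= m: if m % p == 0: (append p if new); m //= p  else: p += 2
-- (the guard 3 ≤ p only makes the recursion total; p starts at 3 and only grows)
def loopB (m p : Int) (primes : List Int) : Int × List Int :=
  if h : 3 ≤ p ∧ p * p ≤ m then
    if hmod : PySem.Int.mod m p = 0 then
      loopB (PySem.Int.floordiv m p) p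
        (if primes = [] ∨ primes.getLast? ≠ some p then primes ++ [p] else primes)
    else loopB m (p + 2) primes
  else (m, primes)
termination_by (m.toNat, (m - p).toNat)
decreasing_by
  · obtain ⟨hp, hpm⟩ := h
    have h0 : 0 < m := by nlinarith
    have hd : p ∣ m := (PySem.Int.mod_eq_zero_iff_dvd m p).mp hmod
    obtain ⟨c, hc⟩ := hd
    have h2 : PySem.Int.floordiv m p = m / p := PySem.Int.floordiv_eq_ediv_of_pos (by omega)
    have h5 : m / p = c := by rw [hc]; exact Int.mul_ediv_cancel_left c (by omega)
    have hc0 : 0 < c := by nlinarith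
    have hcm : c < m := by nlinarith
    left; simp only [h2, h5]; omega
  · obtain ⟨hp, hpm⟩ := h
    have h3 : 3 * p ≤ p * p := by nlinarith
    right; omega

-- if m > 1 and (not primes or primes[-1] != m): primes.append(m) ; return len(primes) <= 1
def finalizeB (m : Int) (primes : List Int) : Bool :=
  let primes' := if 1 < m ∧ (primes = [] ∨ primes.getLast? ≠ some m) then primes ++ [m] else primes
  decide (primes'.length ≤ 1)

def finishB (m : Int) : Bool :=
  let r := loopB m 3 []
  finalizeB r.1 r.2

def primitive_root_exists_alt (n : Int) : Bool :=
  if n = 1 ∨ n = 2 ∨ n = 4 then true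
  else if PySem.Int.mod n 2 = 0 then
    let m := PySem.Int.floordiv n 2
    if PySem.Int.mod m 2 = 0 then false else finishB m
  else finishB n

-- ===== PRECONDITION & SPEC =====
-- Pre_ excludes exactly the inputs where A raises: for n < 0 with n % 4 != 0 the loop bound
-- int(m**0.5) is evaluated on a negative m, a complex power, so int() raises TypeError.
def Pre_primitive_root_exists (n : Int) : Prop := 0 ≤ n ∨ PySem.Int.mod n 4 = 0
instance (n : Int) : Decidable (Pre_primitive_root_exists n) := by
  unfold Pre_primitive_root_exists; infer_instance

def pvWitness_primitive_root_exists : Int := (7)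

def Spec_primitive_root_exists (n : Int) (out : Bool) : Prop := out = primitive_root_exists_alt n
instance (n : Int) (out : Bool) : Decidable (Spec_primitive_root_exists n out) := by
  unfold Spec_primitive_root_exists; infer_instance

-- ===== CLAIM (what is proved, stated in full; the proofs are below) =====
def Claim_equal_primitive_root_exists : Prop :=
  ∀ (n : Int), Dom_primitive_root_exists n → Pre_primitive_root_exists n →
    Spec_primitive_root_exists n (primitive_root_exists n)

-- ===== LEMMAS AND PROOFS =====

-- Nat mirrors of the two loops (proof-side only)
def stripN (M p : Nat) : Nat :=
  if h : 2 ≤ p ∧ 0 < M ∧ M % p = 0 then stripN (M / p) p else M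
termination_by M
decreasing_by exact Nat.div_lt_self h.2.1 (by omega)

def loopBN (M p : Nat) (primes : List Nat) : Nat × List Nat :=
  if h : 3 ≤ p ∧ p * p ≤ M then
    if M % p = 0 then
      loopBN (M / p) p
        (if primes = [] ∨ primes.getLast? ≠ some p then primes ++ [p] else primes)
    else loopBN M (p + 2) primes
  else (M, primes)
termination_by (M, M - p)
decreasing_by
  · have h0 : 0 < M := by nlinarith [h.1, h.2]
    exact Prod.Lex.left _ _ (Nat.div_lt_self h0 (by omega))
  · have h3 : 3 * p ≤ p * p := Nat.mul_le_mul_right p h.1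
    have h4 : p < M := by omega
    exact Prod.Lex.right _ (by omega)

def finalizeN (m : Nat) (primes : List Nat) : Bool :=
  let primes' := if 1 < m ∧ (primes = [] ∨ primes.getLast? ≠ some m) then primes ++ [m] else primes
  decide (primes'.length ≤ 1)

-- bridges Int → Nat
lemma stripA_cast (M p : Nat) : stripA (M : Int) (p : Int) = ((stripN M p : Nat) : Int) := by
  fun_induction stripN M p with
  | case1 M h ih =>
    rw [stripA]
    have hc : 2 ≤ (p:Int) ∧ 0 < (M:Int) ∧ PySem.Int.mod (M:Int) (p:Int) = 0 := by
      refine ⟨by exact_mod_cast h.1, by exact_mod_cast h.2.1, ?_⟩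
      rw [PySem.Int.mod_natCast]; exact_mod_cast h.2.2
    rw [dif_pos hc]
    rw [PySem.Int.floordiv_natCast]
    exact ih
  | case2 M h =>
    rw [stripA]
    rw [dif_neg]
    intro hc
    exact h ⟨by exact_mod_cast hc.1, by exact_mod_cast hc.2.1, by
      have := hc.2.2; rw [PySem.Int.mod_natCast] at this; exact_mod_cast this⟩

lemma loopB_cast (M p : Nat) (P : List Nat) :
    loopB (M : Int) (p : Int) (P.map (Nat.cast : Nat → Int))
      = (((loopBN M p P).1 : Int), (loopBN M p P).2.map (Nat.cast : Nat → Int)) := by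
  fun_induction loopBN M p P with
  | case1 M p P h hmod ih =>
    rw [loopB]
    have hc : 3 ≤ (p:Int) ∧ (p:Int) * (p:Int) ≤ (M:Int) := by
      constructor <;> [exact_mod_cast h.1; exact_mod_cast h.2]
    rw [dif_pos hc]
    have hm : PySem.Int.mod (M:Int) (p:Int) = 0 := by
      rw [PySem.Int.mod_natCast]; exact_mod_cast hmod
    rw [dif_pos hm, PySem.Int.floordiv_natCast]
    have hcond : (P.map (Nat.cast : Nat → Int) = [] ∨ (P.map (Nat.cast : Nat → Int)).getLast? ≠ some ((p : Int)))
        ↔ (P = [] ∨ P.getLast? ≠ some p) := by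
      rw [List.map_eq_nil_iff, List.getLast?_map]
      refine or_congr Iff.rfl (not_congr ?_)
      rw [Option.map_eq_some_iff]
      constructor
      · rintro ⟨a, ha, hcast⟩
        have hap : a = p := by exact_mod_cast hcast
        cases hap
        exact ha
      · intro hh
        exact ⟨p, hh, rfl⟩
    by_cases hP : P = [] ∨ P.getLast? ≠ some p
    · rw [if_pos (hcond.mpr hP)]
      simp only [if_pos hP, dif_pos hP] at ih ⊢
      have hm2 : P.map (Nat.cast : Nat → Int) ++ [(p : Int)] = (P ++ [p]).map (Nat.cast : Nat → Int) := by
        simp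
      rw [hm2]
      exact ih
    · rw [if_neg (fun hh => hP (hcond.mp hh))]
      simp only [if_neg hP, dif_neg hP] at ih ⊢
      exact ih
  | case2 M p P h hmod ih =>
    rw [loopB]
    have hc : 3 ≤ (p:Int) ∧ (p:Int) * (p:Int) ≤ (M:Int) := by
      constructor <;> [exact_mod_cast h.1; exact_mod_cast h.2]
    rw [dif_pos hc]
    have hm : ¬ PySem.Int.mod (M:Int) (p:Int) = 0 := by
      rw [PySem.Int.mod_natCast]; exact_mod_cast hmod
    rw [dif_neg hm]
    push_cast at ih ⊢
    exact ih
  | case3 M p P h =>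
    rw [loopB, dif_neg]
    intro hc
    exact h ⟨by exact_mod_cast hc.1, by exact_mod_cast hc.2⟩

lemma finalize_cast (m : Nat) (P : List Nat) :
    finalizeB (m : Int) (P.map (Nat.cast : Nat → Int)) = finalizeN m P := by
  unfold finalizeB finalizeN
  have hcond : (1 < (m:Int) ∧ (P.map (Nat.cast : Nat → Int) = [] ∨ (P.map (Nat.cast : Nat → Int)).getLast? ≠ some ((m : Int))))
      ↔ (1 < m ∧ (P = [] ∨ P.getLast? ≠ some m)) := by
    refine and_congr (by exact_mod_cast Iff.rfl) ?_
    rw [List.map_eq_nil_iff, List.getLast?_map]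
    refine or_congr Iff.rfl (not_congr ?_)
    rw [Option.map_eq_some_iff]
    constructor
    · rintro ⟨a, ha, hcast⟩
      have hap : a = m := by exact_mod_cast hcast
      cases hap
      exact ha
    · intro hh
      exact ⟨m, hh, rfl⟩
  by_cases hP : 1 < m ∧ (P = [] ∨ P.getLast? ≠ some m)
  · rw [if_pos (hcond.mpr hP), if_pos hP]
    simp
  · rw [if_neg (fun hh => hP (hcond.mp hh)), if_neg hP]
    simp

lemma stripN_spec (M p : Nat) (hp : 2 ≤ p) (hM : 0 < M) :
    ∃ a, M = p ^ a * stripN M p ∧ ¬ p ∣ stripN M p := by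
  fun_induction stripN M p with
  | case1 M h ih =>
    have hd : p ∣ M := Nat.dvd_of_mod_eq_zero h.2.2
    have hM0 : 0 < M / p := Nat.div_pos (Nat.le_of_dvd h.2.1 hd) (by omega)
    obtain ⟨a, ha, hnd⟩ := ih hM0
    refine ⟨a + 1, ?_, hnd⟩
    calc M = p * (M / p) := (Nat.mul_div_cancel' hd).symm
      _ = p * (p ^ a * stripN (M / p) p) := by conv_lhs => rw [ha]
      _ = p ^ (a + 1) * stripN (M / p) p := by ring
  | case2 M h =>
    have hnd : ¬ p ∣ M := fun hd => h ⟨hp, hM, Nat.mod_eq_zero_of_dvd hd⟩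
    exact ⟨0, by simp, hnd⟩

lemma loopA_nodiv (m : Int) (L : List Int) (h : ∀ d ∈ L, PySem.Int.mod m d ≠ 0) :
    loopA m L = true := by
  induction L with
  | nil => rfl
  | cons d rest ih =>
    rw [loopA, if_neg (h d (List.mem_cons_self))]
    exact ih (fun x hx => h x (List.mem_cons_of_mem d hx))

lemma loopA_first (m p0 : Int) (L : List Int) (hmem : p0 ∈ L)
    (hdvd : PySem.Int.mod m p0 = 0)
    (hmin : ∀ d ∈ L, PySem.Int.mod m d = 0 → p0 ≤ d)
    (hsort : L.Pairwise (· < ·)) :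
    loopA m L = decide (stripA m p0 = 1) := by
  induction L with
  | nil => cases hmem
  | cons d rest ih =>
    rw [loopA]
    by_cases hd : PySem.Int.mod m d = 0
    · rw [if_pos hd]
      have hle : p0 ≤ d := hmin d List.mem_cons_self hd
      rcases List.mem_cons.mp hmem with h1 | h1
      · rw [h1]
      · exact absurd hle (not_le.mpr ((List.pairwise_cons.mp hsort).1 p0 h1))
    · rw [if_neg hd]
      have hne : p0 ≠ d := fun hh => hd (hh ▸ hdvd)
      exact ih (List.mem_cons.mp hmem |>.resolve_left hne)
        (fun x hx hh => hmin x (List.mem_cons_of_mem d hx) hh)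
        (List.pairwise_cons.mp hsort).2

lemma pyRange2_pairwise (a b : Int) : (PySem.List.pyRange a b 2).Pairwise (· < ·) := by
  rw [PySem.List.pyRange_of_pos a b (by norm_num)]
  exact List.Pairwise.map _ (fun x y (hxy : x < y) => by omega) List.pairwise_lt_range

lemma loopBN_ext (M p : Nat) (P : List Nat) : ∃ t, (loopBN M p P).2 = P ++ t := by
  fun_induction loopBN M p P with
  | case1 M p P h hmod ih =>
    obtain ⟨t, ht⟩ := ih
    by_cases hP : P = [] ∨ P.getLast? ≠ some p
    · simp only [dif_pos hP, if_pos hP] at ht ⊢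
      exact ⟨p :: t, by rw [ht, List.append_assoc]; rfl⟩
    · simp only [dif_neg hP, if_neg hP] at ht ⊢
      exact ⟨t, ht⟩
  | case2 M p P h hmod ih => exact ih
  | case3 M p P h => exact ⟨[], (List.append_nil P).symm⟩

lemma loopBN_nodiv (k M p : Nat) (P : List Nat) (hk : M - p ≤ k) (hp : 3 ≤ p)
    (h : ∀ d, 3 ≤ d → d * d ≤ M → ¬ d ∣ M) : loopBN M p P = (M, P) := by
  induction k generalizing p with
  | zero =>
    rw [loopBN, dif_neg]
    rintro ⟨h1, h2⟩
    have h3 : 3 * p ≤ p * p := Nat.mul_le_mul_right p h1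
    omega
  | succ k ih =>
    rw [loopBN]
    by_cases hg : 3 ≤ p ∧ p * p ≤ M
    · rw [dif_pos hg]
      rw [if_neg (fun hmod => h p hp hg.2 (Nat.dvd_of_mod_eq_zero hmod))]
      have h3 : 3 * p ≤ p * p := Nat.mul_le_mul_right p hg.1
      exact ih (p + 2) (by omega) (by omega)
    · rw [dif_neg hg]

lemma loopBN_skip (M q : Nat) (hq2 : q % 2 = 1) (hqM : q * q ≤ M)
    (hmin : ∀ d, 2 ≤ d → d ∣ M → q ≤ d) :
    ∀ k p (P : List Nat), q - p ≤ k → 3 ≤ p → p % 2 = 1 → p ≤ q →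
      loopBN M p P = loopBN M q P := by
  intro k
  induction k with
  | zero =>
    intro p P hk hp hp2 hpq
    have : p = q := by omega
    rw [this]
  | succ k ih =>
    intro p P hk hp hp2 hpq
    by_cases hpq' : p = q
    · rw [hpq']
    · have hplt : p < q := by omega
      have hple : p + 2 ≤ q := by omega
      rw [loopBN, dif_pos ⟨hp, by nlinarith⟩]
      rw [if_neg (fun hmod => by
        have := hmin p (by omega) (Nat.dvd_of_mod_eq_zero hmod)
        omega)]
      exact ih (p + 2) P (by omega) (by omega) (by omega) hple

lemma finalizeN_long (m : Nat) (P : List Nat) (h : 2 ≤ P.length) : finalizeN m P = false := by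
  unfold finalizeN
  split_ifs with h1
  · simp only [List.length_append, List.length_cons, List.length_nil, decide_eq_false_iff_not]
    omega
  · simp only [decide_eq_false_iff_not]
    omega

lemma loopBN_pow (p0 : Nat) (hp : 3 ≤ p0) (j : Nat) :
    loopBN (p0 ^ j) p0 [p0] = (p0 ^ min j 1, [p0]) := by
  induction j with
  | zero =>
    rw [loopBN, dif_neg]
    · rfl
    · rintro ⟨h1, h2⟩; simp at h2; nlinarith
  | succ j ih =>
    match j, ih with
    | 0, _ =>
      rw [loopBN, dif_neg]
      · rfl
      · rintro ⟨h1, h2⟩; simp at h2; nlinarith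
    | j + 1, ih =>
      rw [loopBN, dif_pos ⟨hp, by
        calc p0 * p0 = p0 ^ 2 * 1 := by ring
          _ ≤ p0 ^ (j + 2) * 1 := by
            exact Nat.mul_le_mul_right 1 (Nat.pow_le_pow_right (by omega) (by omega))
          _ = p0 ^ (j + 2) := by ring⟩]
      rw [if_pos (by
        have : p0 ∣ p0 ^ (j + 2) := dvd_pow_self p0 (by omega)
        exact Nat.mod_eq_zero_of_dvd this)]
      have hcond : ¬(([p0] : List Nat) = [] ∨ ([p0] : List Nat).getLast? ≠ some p0) := by simp
      rw [if_neg hcond]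
      have hdiv : p0 ^ (j + 2) / p0 = p0 ^ (j + 1) := by
        rw [pow_succ]
        exact Nat.mul_div_cancel _ (by omega)
      rw [hdiv, ih]
      have : min (j + 1) 1 = 1 := by omega
      have h2 : min (j + 2) 1 = 1 := by omega
      rw [this, h2]

lemma loopBN_strip (p0 r : Nat) (hp : 3 ≤ p0) (hr : p0 < r) (j : Nat) :
    loopBN (p0 ^ j * r) p0 [p0] = loopBN r p0 [p0] := by
  induction j with
  | zero => simp
  | succ j ih =>
    rw [loopBN, dif_pos ⟨hp, by
      have h1 : p0 ^ (j + 1) ≥ p0 := Nat.le_self_pow (by omega) p0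
      nlinarith⟩]
    rw [if_pos (by
      have : p0 ∣ p0 ^ (j + 1) * r := Dvd.dvd.mul_right (dvd_pow_self p0 (by omega)) r
      exact Nat.mod_eq_zero_of_dvd this)]
    have hcond : ¬(([p0] : List Nat) = [] ∨ ([p0] : List Nat).getLast? ≠ some p0) := by simp
    rw [if_neg hcond]
    have hdiv : p0 ^ (j + 1) * r / p0 = p0 ^ j * r := by
      rw [pow_succ, mul_comm (p0 ^ j) p0, mul_assoc]
      exact Nat.mul_div_cancel_left _ (by omega)
    rw [hdiv, ih]

lemma loopBN_fail (p0 : Nat) :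
    ∀ k m p, m - p ≤ k → 1 < m → 3 ≤ p → ¬ p0 ∣ m →
      finalizeN (loopBN m p [p0]).1 (loopBN m p [p0]).2 = false := by
  intro k
  induction k with
  | zero =>
    intro m p hk hm hp hnd
    rw [loopBN, dif_neg (by
      rintro ⟨h1, h2⟩
      have h3 : 3 * p ≤ p * p := Nat.mul_le_mul_right p h1
      omega)]
    have hne : m ≠ p0 := fun hh => hnd (hh ▸ dvd_refl p0)
    unfold finalizeN
    rw [if_pos ⟨hm, Or.inr (by simp; omega)⟩]
    simp
  | succ k ih =>
    intro m p hk hm hp hnd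
    rw [loopBN]
    by_cases hg : 3 ≤ p ∧ p * p ≤ m
    · rw [dif_pos hg]
      by_cases hmod : m % p = 0
      · rw [if_pos hmod]
        have hpp0 : p ≠ p0 := fun hh => hnd (hh ▸ Nat.dvd_of_mod_eq_zero hmod)
        rw [if_pos (Or.inr (by simp; omega))]
        obtain ⟨t, ht⟩ := loopBN_ext (m / p) p ([p0] ++ [p])
        apply finalizeN_long
        rw [ht]
        simp
      · rw [if_neg hmod]
        have h3 : 3 * p ≤ p * p := Nat.mul_le_mul_right p hg.1
        exact ih m (p + 2) (by omega) hm (by omega) hnd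
    · rw [dif_neg hg]
      have hne : m ≠ p0 := fun hh => hnd (hh ▸ dvd_refl p0)
      unfold finalizeN
      rw [if_pos ⟨hm, Or.inr (by simp; omega)⟩]
      simp

lemma core (M : Nat) (hM : M % 2 = 1) : oddA (M : Int) = finishB (M : Int) := by
  by_cases hM1 : M = 1
  · subst hM1
    have hA : oddA ((1 : Nat) : Int) = true := by
      unfold oddA
      apply loopA_nodiv
      intro d hd
      rw [PySem.List.mem_pyRange_iff_of_pos (by norm_num)] at hd
      have : pysqrtA ((1 : Nat) : Int) = 1 := by
        unfold pysqrtA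
        rw [Int.toNat_natCast]
        norm_num
      rw [this] at hd
      omega
    have hB : finishB ((1 : Nat) : Int) = finalizeN (loopBN 1 3 []).1 (loopBN 1 3 []).2 := by
      unfold finishB
      rw [show (3 : Int) = ((3 : Nat) : Int) by norm_num]
      rw [show ([] : List Int) = List.map (Nat.cast : Nat → Int) [] from rfl]
      rw [loopB_cast]
      exact finalize_cast _ _
    rw [hA, hB, loopBN_nodiv 0 1 3 [] (by omega) (by norm_num) (by intro d h3 hdd; have h9 : 9 ≤ d * d := Nat.mul_le_mul h3 h3; omega)]
    simp [finalizeN]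
  have hM3 : 3 ≤ M := by omega
  set p0 := M.minFac with hp0def
  have hprime : p0.Prime := Nat.minFac_prime hM1
  have hp0dvd : p0 ∣ M := Nat.minFac_dvd M
  have hp02 : 2 ≤ p0 := hprime.two_le
  have hp0ne2 : p0 ≠ 2 := by
    intro hh
    have : 2 ∣ M := hh ▸ hp0dvd
    omega
  have hp03 : 3 ≤ p0 := by omega
  have hp0odd : p0 % 2 = 1 := by
    rcases Nat.mod_two_eq_zero_or_one p0 with h0 | h1
    · have h2 : 2 ∣ p0 := Nat.dvd_of_mod_eq_zero h0
      have : 2 ∣ M := dvd_trans h2 hp0dvd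
      omega
    · exact h1
  have hmin : ∀ d, 2 ≤ d → d ∣ M → p0 ≤ d := fun d h2 hd => Nat.minFac_le_of_dvd h2 hd
  -- Bridge the B side to the Nat mirror
  have hB : finishB (M : Int) = finalizeN (loopBN M 3 []).1 (loopBN M 3 []).2 := by
    unfold finishB
    rw [show (3 : Int) = ((3 : Nat) : Int) by norm_num]
    rw [show ([] : List Int) = List.map (Nat.cast : Nat → Int) [] from rfl]
    rw [loopB_cast]
    exact finalize_cast _ _
  have hsq : pysqrtA (M : Int) = ((Nat.sqrt M : Nat) : Int) := by
    unfold pysqrtA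
    rw [Int.toNat_natCast]
    rfl
  by_cases hcase : p0 * p0 ≤ M
  · -- the least odd divisor is within the scan
    have hp0sq : p0 ≤ Nat.sqrt M := Nat.le_sqrt.mpr hcase
    have hA : oddA (M : Int) = decide (stripA (M : Int) ((p0 : Nat) : Int) = 1) := by
      unfold oddA
      rw [hsq]
      apply loopA_first
      · rw [PySem.List.mem_pyRange_iff_of_pos (by norm_num)]
        refine ⟨by exact_mod_cast hp03, by exact_mod_cast Nat.lt_succ_of_le hp0sq, by omega⟩
      · rw [PySem.Int.mod_natCast]
        exact_mod_cast Nat.mod_eq_zero_of_dvd hp0dvd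
      · intro d hd hmod
        rw [PySem.List.mem_pyRange_iff_of_pos (by norm_num)] at hd
        have hd3 : 3 ≤ d := hd.1
        have hdd : d ∣ (M : Int) := (PySem.Int.mod_eq_zero_iff_dvd _ _).mp hmod
        have hdnat : (d.toNat : Int) = d := Int.toNat_of_nonneg (by omega)
        have hdvdN : d.toNat ∣ M := by
          rw [← Int.natCast_dvd_natCast]
          rw [hdnat]
          exact hdd
        have := hmin d.toNat (by omega) hdvdN
        omega
      · exact pyRange2_pairwise _ _
    rw [hA, hB]
    have hstrip : stripA (M : Int) ((p0 : Nat) : Int) = ((stripN M p0 : Nat) : Int) :=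
      stripA_cast M p0
    rw [hstrip]
    -- B side: skip to p0, divide once, then by cases on the stripped cofactor
    rw [loopBN_skip M p0 hp0odd hcase hmin p0 3 [] (by omega) (by norm_num) (by norm_num) hp03]
    rw [loopBN, dif_pos ⟨hp03, hcase⟩, if_pos (Nat.mod_eq_zero_of_dvd hp0dvd),
      if_pos (show ([] : List Nat) = [] ∨ ([] : List Nat).getLast? ≠ some p0 from Or.inl rfl)]
    obtain ⟨a, haM, hnd⟩ := stripN_spec M p0 hp02 (by omega)
    have ha1 : 1 ≤ a := by
      rcases Nat.eq_zero_or_pos a with h0 | h1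
      · rw [h0, pow_zero, one_mul] at haM
        exact absurd (haM ▸ hp0dvd) hnd
      · exact h1
    have hr0 : 0 < stripN M p0 := by
      rcases Nat.eq_zero_or_pos (stripN M p0) with h0 | h1
      · rw [h0, mul_zero] at haM; omega
      · exact h1
    have hdivM : M / p0 = p0 ^ (a - 1) * stripN M p0 := by
      conv_lhs => rw [haM]
      rw [show a = (a - 1) + 1 by omega, pow_succ]
      rw [show p0 ^ (a - 1) * p0 * stripN M p0 = p0 * (p0 ^ (a - 1) * stripN M p0) by ring]
      exact Nat.mul_div_cancel_left _ (by omega)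
    rw [List.nil_append, hdivM]
    by_cases hr1 : stripN M p0 = 1
    · rw [hr1, mul_one, loopBN_pow p0 hp03 (a - 1)]
      have hmm : min (a - 1) 1 = 0 ∨ min (a - 1) 1 = 1 := by omega
      rcases hmm with hmm | hmm
      · rw [hmm, pow_zero]
        simp [finalizeN]
      · rw [hmm, pow_one]
        simp [finalizeN]
    · have hrdvd : stripN M p0 ∣ M := ⟨p0 ^ a, by
        conv_lhs => rw [haM]
        ring⟩
      have hr2 : 1 < stripN M p0 := by omega
      have hq := Nat.minFac_dvd (stripN M p0)
      have hqM : (stripN M p0).minFac ∣ M := dvd_trans hq hrdvd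
      have hq2 : 2 ≤ (stripN M p0).minFac := (Nat.minFac_prime hr1).two_le
      have hqp0 : p0 ≤ (stripN M p0).minFac := hmin _ hq2 hqM
      have hqne : (stripN M p0).minFac ≠ p0 := by
        intro hh
        rw [hh] at hq
        exact hnd hq
      have hrr : p0 < stripN M p0 := by
        have hle : (stripN M p0).minFac ≤ stripN M p0 := Nat.minFac_le hr0
        omega
      rw [loopBN_strip p0 _ hp03 hrr (a - 1)]
      rw [loopBN_fail p0 (stripN M p0) _ p0 (by omega) hr2 hp03 hnd]
      simp only [decide_eq_false_iff_not]
      intro hh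
      have : stripN M p0 = 1 := by exact_mod_cast hh
      exact hr1 this
  · -- no divisor at all: both sides report a prime (or prime-power-free) odd part
    have hnodivN : ∀ d, 3 ≤ d → d * d ≤ M → ¬ d ∣ M := by
      intro d h3 hdd hdvd
      have := hmin d (by omega) hdvd
      nlinarith
    have hA : oddA (M : Int) = true := by
      unfold oddA
      rw [hsq]
      apply loopA_nodiv
      intro d hd hmod
      rw [PySem.List.mem_pyRange_iff_of_pos (by norm_num)] at hd
      have hd3 : 3 ≤ d := hd.1
      have hdd : d ∣ (M : Int) := (PySem.Int.mod_eq_zero_iff_dvd _ _).mp hmod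
      have hdnat : (d.toNat : Int) = d := Int.toNat_of_nonneg (by omega)
      have hdvdN : d.toNat ∣ M := by
        rw [← Int.natCast_dvd_natCast]
        rw [hdnat]
        exact hdd
      have hdsq : d.toNat ≤ Nat.sqrt M := by omega
      exact hnodivN d.toNat (by omega) (by
        have := Nat.le_sqrt.mp hdsq
        omega) hdvdN
    rw [hA, hB]
    rw [loopBN_nodiv M M 3 [] (by omega) (by norm_num) hnodivN]
    symm
    unfold finalizeN
    rw [if_pos ⟨by omega, Or.inl rfl⟩]
    simp

lemma prx_agree : ∀ (n : Int), Pre_primitive_root_exists n → primitive_root_exists n = primitive_root_exists_alt n := by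
  intro n hpre
  unfold primitive_root_exists primitive_root_exists_alt
  by_cases hn : n = 1 ∨ n = 2 ∨ n = 4
  · rw [if_pos hn, if_pos hn]
  rw [if_neg hn, if_neg hn]
  have hmod2 : PySem.Int.mod n 2 = n % 2 := PySem.Int.mod_eq_emod_of_pos (by norm_num)
  by_cases he : PySem.Int.mod n 2 = 0
  · rw [if_pos he, if_pos he]
    have hdiv2 : PySem.Int.floordiv n 2 = n / 2 := PySem.Int.floordiv_eq_ediv_of_pos (by norm_num)
    have hmodm : PySem.Int.mod (PySem.Int.floordiv n 2) 2 = (PySem.Int.floordiv n 2) % 2 :=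
      PySem.Int.mod_eq_emod_of_pos (by norm_num)
    by_cases hm2 : PySem.Int.mod (PySem.Int.floordiv n 2) 2 = 0
    · rw [if_pos hm2, if_pos hm2]
    rw [if_neg hm2, if_neg hm2]
    -- here n must be nonnegative: a negative n in Pre_ has n % 4 == 0, whence n//2 is even
    have hn0 : 0 ≤ n := by
      rcases hpre with h | h
      · exact h
      · exfalso
        apply hm2
        rw [hmodm, hdiv2]
        rw [PySem.Int.mod_eq_emod_of_pos (by norm_num)] at h
        omega
    have hM : n / 2 = ((((n / 2).toNat : Nat)) : Int) := by
      rw [Int.toNat_of_nonneg (by positivity)]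
    rw [hdiv2, hM]
    apply core
    rw [hmodm, hdiv2, hM] at hm2
    omega
  · rw [if_neg he, if_neg he]
    have hn0 : 0 ≤ n := by
      rcases hpre with h | h
      · exact h
      · exfalso
        apply he
        rw [hmod2]
        rw [PySem.Int.mod_eq_emod_of_pos (by norm_num)] at h
        omega
    have hM : n = ((n.toNat : Nat) : Int) := (Int.toNat_of_nonneg hn0).symm
    rw [hM]
    apply core
    rw [hmod2, hM] at he
    omega

-- ===== VERDICT (by name: the statement is the Claim_ definition above) =====
theorem primitive_root_exists_spec : Claim_equal_primitive_root_exists := by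
  intro n _ hpre
  unfold Spec_primitive_root_exists
  exact prx_agree n hpre
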